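-- pv_equiv track=rewrite | github.com/WojtekReu/advent_of_code | 2021/day04.py | prepare_boards
-- ===== SOURCE A (Python) =====
-- def prepare_boards(data) -> list[list[list[str]]]:
--     boards = []
--     table = []
--     for row in data[1:]:
--         if not row:
--             if table:
--                 cols = []
--                 for i in range(len(table[0])):
--                     cols.append([row[i] for row in table])
--                 # table has list with rows and cols.
--                 table += cols
--                 boards.append(table)
--             table = []
--         else:
--             table.append([v for v in row.split()])
--     return boards
-- ===== SOURCE B (Python) =====
-- def prepare_boards(data) -> list[list[list[str]]]:
--     # Recursive, accumulator-free: peel the prefix up to the next blank line,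
--     # turn it into a board (split rows + zip-transpose), recurse on the remainder.
--     def go(lines):
--         if "" not in lines:
--             return []  # trailing unterminated segment (if any) is dropped
--         k = lines.index("")
--         rest = go(lines[k + 1:])
--         seg = lines[:k]
--         if not seg:
--             return rest
--         rows = [line.split() for line in seg]
--         return [rows + [list(col) for col in zip(*rows)]] + rest
--     return go(data[1:])
-- ===== Notes on version B (the rewrite author's own statement) =====
-- stated objective: alternative
-- what changed: A is a single imperative pass with a boards/table accumulator pair and an index-built transpose keyed off the first row; B has no accumulator at all: it recursively finds the index of the next blank line, slices the segment off, turns it into rows plus a zip-style transpose and conses it onto the recursive result for the remainder. Pre_ excludes exactly the inputs on which A raises IndexError (a blank-terminated segment whose first row has more entries than some later row).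
import Mathlib
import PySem

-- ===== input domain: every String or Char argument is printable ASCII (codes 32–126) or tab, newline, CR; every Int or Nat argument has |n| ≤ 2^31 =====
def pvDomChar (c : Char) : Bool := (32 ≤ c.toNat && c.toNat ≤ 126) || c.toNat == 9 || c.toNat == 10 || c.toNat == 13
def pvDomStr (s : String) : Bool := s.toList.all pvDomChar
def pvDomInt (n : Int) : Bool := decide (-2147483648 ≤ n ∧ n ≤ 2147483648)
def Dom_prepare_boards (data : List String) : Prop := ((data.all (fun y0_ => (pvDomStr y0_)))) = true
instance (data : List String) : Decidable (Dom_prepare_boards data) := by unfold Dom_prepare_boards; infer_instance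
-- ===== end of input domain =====

-- B replaces A's single accumulator-pass (inline index-built transpose) by an
-- accumulator-free recursion: find the next blank line, slice the segment off, board it
-- (split rows + zip-transpose), recurse on the remainder; objective: alternative.


-- ===== PORT A =====
-- one loop step of A: blank line commits the current table (rows ++ index-built columns), else append the split row
def pbStepA (st : List (List (List String)) × List (List String)) (row : String) :
    List (List (List String)) × List (List String) :=
  if row = "" then
    if st.2 ≠ [] then
      (st.1 ++ [st.2 ++ (PySem.List.pyRange 0 ((PySem.List.pyGetD st.2 0 []).length : Int) 1).map
          (fun i => st.2.map (fun r => PySem.List.pyGetD r i ""))], [])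
    else (st.1, [])
  else (st.1, st.2 ++ [PySem.Str.split₀ row])

def prepare_boards (data : List String) : List (List (List String)) :=
  ((PySem.List.slice data (some 1) none).foldl pbStepA ([], [])).1

-- ===== PORT B =====
-- zip(*rows): columns up to the shortest row (zip() of no iterables is empty)
def pbZip (rows : List (List String)) : List (List String) :=
  match (rows.map List.length).min? with
  | none => []
  | some m => (List.range m).map (fun i => rows.map (fun r => r.getD i ""))

-- B's recursion `go`: `"" not in lines` / `lines.index("")` are the membership test and
-- first-index (idxOf, exact since membership is guaranteed); the slices lines[:k] and
-- lines[k+1:] are take/drop, exact because 0 ≤ k < lines.length here.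
def pbGo (lines : List String) : List (List (List String)) :=
  if h : "" ∈ lines then
    let k := lines.idxOf ""
    let rest := pbGo (lines.drop (k + 1))
    let seg := lines.take k
    if seg = [] then rest
    else
      let rows := seg.map PySem.Str.split₀
      (rows ++ pbZip rows) :: rest
  else []
termination_by lines.length
decreasing_by
  have hne : lines.length ≠ 0 := by
    rintro h0; rw [List.length_eq_zero_iff] at h0; subst h0; simp at h
  simp only [List.length_drop]; omega

def prepare_boards_alt (data : List String) : List (List (List String)) :=
  pbGo (PySem.List.slice data (some 1) none)

-- ===== PRECONDITION & SPEC =====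
-- Pre_ excludes exactly the inputs on which A raises IndexError: a blank-terminated board
-- segment containing a row with fewer whitespace-separated entries than its first row.
def Pre_prepare_boards (data : List String) : Prop :=
  ∀ seg ∈ (((data.drop 1).splitOn "").dropLast), ∀ r ∈ seg,
    (PySem.Str.split₀ (seg.headD "")).length ≤ (PySem.Str.split₀ r).length
instance (data : List String) : Decidable (Pre_prepare_boards data) := by
  unfold Pre_prepare_boards; infer_instance
def pvWitness_prepare_boards : List String := ["draws", "1 2", "3 4", "", "5 6", "7 8", ""]

def Spec_prepare_boards (data : List String) (out : List (List (List String))) : Prop :=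
  out = prepare_boards_alt data
instance (data : List String) (out : List (List (List String))) : Decidable (Spec_prepare_boards data out) := by unfold Spec_prepare_boards; infer_instance

-- ===== CLAIM (what is proved, stated in full; the proofs are below) =====
def Claim_equal_prepare_boards : Prop := ∀ (data : List String), Dom_prepare_boards data → Pre_prepare_boards data → Spec_prepare_boards data (prepare_boards data)

-- ===== LEMMAS AND PROOFS =====

-- proof-only intermediate: a segment fold (gather nonblank lines, a blank commits the segment)
def pbStepSeg (st : List (List String) × List String) (line : String) :
    List (List String) × List String :=
  if line ≠ "" then (st.1, st.2 ++ [line])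
  else if st.2 ≠ [] then (st.1 ++ [st.2], []) else st

-- proof-only: what B computes per segment
def pbBuild (seg : List String) : List (List String) :=
  seg.map PySem.Str.split₀ ++ pbZip (seg.map PySem.Str.split₀)

-- On a committed in-bounds segment, A's index-built columns are B's truncating zip.
lemma pb_cols_eq (cur : List String) (h0 : cur ≠ [])
    (h : ∀ r ∈ cur, (PySem.Str.split₀ (cur.headD "")).length ≤ (PySem.Str.split₀ r).length) :
    (PySem.List.pyRange 0 ((PySem.List.pyGetD (cur.map PySem.Str.split₀) 0 []).length : Int) 1).map
        (fun i => (cur.map PySem.Str.split₀).map (fun r => PySem.List.pyGetD r i ""))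
      = pbZip (cur.map PySem.Str.split₀) := by
  obtain ⟨c, cs, rfl⟩ := List.exists_cons_of_ne_nil h0
  have hmin : (((c :: cs).map PySem.Str.split₀).map List.length).min?
      = some (PySem.Str.split₀ c).length := by
    rw [List.min?_eq_some_iff]
    refine ⟨by simp, ?_⟩
    intro b hb
    simp only [List.map_map, List.mem_map, Function.comp] at hb
    obtain ⟨r, hr, rfl⟩ := hb
    simpa using h r hr
  have hz : pbZip ((c :: cs).map PySem.Str.split₀)
      = (List.range (PySem.Str.split₀ c).length).map
          (fun i => ((c :: cs).map PySem.Str.split₀).map (fun r => r.getD i "")) := by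
    unfold pbZip; rw [hmin]
  rw [hz]
  simp only [List.map_cons, PySem.List.pyGetD_zero_cons, PySem.List.pyRange_zero_natCast,
    List.map_map]
  refine List.map_congr_left (fun k _ => ?_)
  simp [PySem.List.pyGetD_natCast]

-- loop correspondence: A's fold from (acc.map pbBuild, cur.map split₀) tracks the segment fold
lemma pb_loop (lines : List String) : ∀ (cur : List String) (acc : List (List String)),
    "" ∉ cur →
    (∀ seg ∈ (((cur ++ lines).splitOn "").dropLast), ∀ r ∈ seg,
      (PySem.Str.split₀ (seg.headD "")).length ≤ (PySem.Str.split₀ r).length) →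
    (lines.foldl pbStepA (acc.map pbBuild, cur.map PySem.Str.split₀)).1
      = ((lines.foldl pbStepSeg (acc, cur)).1).map pbBuild := by
  induction lines with
  | nil => intro cur acc _ _; simp
  | cons l ls ih =>
    intro cur acc hcur hpre
    by_cases hl : l = ""
    · subst hl
      have hsplit : ((cur ++ "" :: ls).splitOn "") = cur :: (ls.splitOn "") := by
        apply List.splitOnP_first
        · intro x hx hxeq
          have hx' : x = "" := by simpa using hxeq
          exact hcur (hx' ▸ hx)
        · simp
      have hne : (ls.splitOn "" : List (List String)) ≠ [] := List.splitOnP_ne_nil _ _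
      have hpre' : ∀ seg ∈ ((([] : List String) ++ ls).splitOn "").dropLast, ∀ r ∈ seg,
          (PySem.Str.split₀ (seg.headD "")).length ≤ (PySem.Str.split₀ r).length := by
        intro seg hseg
        apply hpre
        rw [hsplit, List.dropLast_cons_of_ne_nil hne]
        simpa using Or.inr (by simpa using hseg)
      by_cases hc : cur = []
      · subst hc
        simpa [pbStepA, pbStepSeg] using ih [] acc (by simp) hpre'
      · have hok : ∀ r ∈ cur, (PySem.Str.split₀ (cur.headD "")).length ≤ (PySem.Str.split₀ r).length := by
          apply hpre
          rw [hsplit, List.dropLast_cons_of_ne_nil hne]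
          simp
        have hmap : cur.map PySem.Str.split₀ ≠ [] := by simpa using hc
        rw [List.foldl_cons, List.foldl_cons]
        have hA : pbStepA (acc.map pbBuild, cur.map PySem.Str.split₀) ""
            = ((acc ++ [cur]).map pbBuild, ([] : List String).map PySem.Str.split₀) := by
          simp only [pbStepA, if_pos hmap, pb_cols_eq cur hc hok]
          simp [pbBuild]
        have hB : pbStepSeg (acc, cur) "" = (acc ++ [cur], []) := by
          simp [pbStepSeg, hc]
        rw [hA, hB]
        exact ih [] (acc ++ [cur]) (by simp) hpre'
    · rw [List.foldl_cons, List.foldl_cons]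
      have hA : pbStepA (acc.map pbBuild, cur.map PySem.Str.split₀) l
          = (acc.map pbBuild, (cur ++ [l]).map PySem.Str.split₀) := by
        simp [pbStepA, hl]
      have hB : pbStepSeg (acc, cur) l = (acc, cur ++ [l]) := by simp [pbStepSeg, hl]
      rw [hA, hB]
      apply ih (cur ++ [l]) acc
      · simp only [List.mem_append, List.mem_singleton]
        rintro (h | h)
        · exact hcur h
        · exact hl h.symm
      · simpa [List.append_assoc] using hpre

-- the segment fold's committed segments, boarded, are exactly B's recursion
lemma pbGo_fold (lines : List String) : ∀ (cur : List String) (acc : List (List String)),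
    "" ∉ cur →
    ((lines.foldl pbStepSeg (acc, cur)).1).map pbBuild
      = acc.map pbBuild ++ pbGo (cur ++ lines) := by
  induction lines with
  | nil =>
    intro cur acc hcur
    rw [pbGo]
    simp [hcur]
  | cons l ls ih =>
    intro cur acc hcur
    by_cases hl : l = ""
    · subst hl
      have hidx : (cur ++ "" :: ls).idxOf "" = cur.length := by
        rw [List.idxOf_append_of_notMem hcur]; simp
      have hgo : pbGo (cur ++ "" :: ls)
          = if cur = [] then pbGo ls
            else (cur.map PySem.Str.split₀ ++ pbZip (cur.map PySem.Str.split₀)) :: pbGo ls := by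
        rw [pbGo]
        have hmem : "" ∈ cur ++ "" :: ls := by simp
        rw [dif_pos hmem]
        simp only [hidx]
        have htake : (cur ++ "" :: ls).take cur.length = cur := by
          simpa using List.take_left cur ("" :: ls)
        have hdrop : (cur ++ "" :: ls).drop (cur.length + 1) = ls := by
          rw [← List.drop_drop, List.drop_left]; rfl
        rw [htake, hdrop]
      by_cases hc : cur = []
      · subst hc
        rw [List.foldl_cons]
        have : pbStepSeg (acc, []) "" = (acc, []) := by simp [pbStepSeg]
        rw [this, ih [] acc (by simp), hgo]
        simp
      · rw [List.foldl_cons]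
        have : pbStepSeg (acc, cur) "" = (acc ++ [cur], []) := by simp [pbStepSeg, hc]
        rw [this, ih [] (acc ++ [cur]) (by simp), hgo, if_neg hc]
        simp [pbBuild]
    · rw [List.foldl_cons]
      have : pbStepSeg (acc, cur) l = (acc, cur ++ [l]) := by simp [pbStepSeg, hl]
      rw [this, ih (cur ++ [l]) acc]
      · simp
      · simp only [List.mem_append, List.mem_singleton]
        rintro (h | h)
        · exact hcur h
        · exact hl h.symm

-- ===== VERDICT (by name: the statement is the Claim_ definition above) =====
theorem prepare_boards_spec : Claim_equal_prepare_boards := by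
  intro data _ hpre
  unfold Spec_prepare_boards prepare_boards prepare_boards_alt
  rw [PySem.List.slice_from_one, ← List.drop_one]
  rw [show (([], []) : List (List (List String)) × List (List String))
      = (([] : List (List String)).map pbBuild, ([] : List String).map PySem.Str.split₀) by simp]
  rw [pb_loop (data.drop 1) [] [] (by simp) (by simpa [Pre_prepare_boards] using hpre),
    pbGo_fold (data.drop 1) [] [] (by simp)]
  simp
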